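-- pv_equiv track=rewrite | github.com/matttang27/GOPSsolver | ai/common.py | compress_cards
-- ===== SOURCE A (Python) =====
-- from typing import List, Tuple
--
-- def compress_cards(a: int, b: int) -> Tuple[int, int]:
--     union = a | b
--     out_bit = 0
--     comp_a = 0
--     comp_b = 0
--     while union:
--         if union & 1:
--             if a & 1:
--                 comp_a |= 1 << out_bit
--             if b & 1:
--                 comp_b |= 1 << out_bit
--             out_bit += 1
--         union >>= 1
--         a >>= 1
--         b >>= 1
--     return comp_a, comp_b
-- ===== SOURCE B (Python) =====
-- def compress_cards(a, b):
--     union = a | b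
--     positions = [i for i in range(union.bit_length()) if (union >> i) & 1]
--     comp_a = sum(1 << j for j, p in enumerate(positions) if (a >> p) & 1)
--     comp_b = sum(1 << j for j, p in enumerate(positions) if (b >> p) & 1)
--     return comp_a, comp_b
-- ===== Notes on version B (the rewrite author's own statement) =====
-- stated objective: alternative
-- what changed: A's single interleaved loop that shifts union, a and b together while or-ing bits into both accumulators is replaced by first materialising the list of set-bit positions of union (bit_length + comprehension) and then computing comp_a and comp_b in two independent enumerate-and-sum passes over that index.
import Mathlib
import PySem

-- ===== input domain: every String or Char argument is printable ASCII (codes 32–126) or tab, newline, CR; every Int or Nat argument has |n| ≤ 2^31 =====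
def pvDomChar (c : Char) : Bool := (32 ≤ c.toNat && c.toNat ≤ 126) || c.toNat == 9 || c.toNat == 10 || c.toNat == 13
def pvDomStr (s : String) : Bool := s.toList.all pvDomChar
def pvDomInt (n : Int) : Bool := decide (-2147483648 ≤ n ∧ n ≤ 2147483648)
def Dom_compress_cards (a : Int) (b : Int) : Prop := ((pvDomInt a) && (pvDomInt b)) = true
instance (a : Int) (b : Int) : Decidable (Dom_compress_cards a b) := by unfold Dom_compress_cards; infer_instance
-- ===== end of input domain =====

-- B replaces A's single interleaved shift-all-three loop by first listing the union's set-bit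
-- positions and then building each output in an independent enumerate-and-sum pass (alternative
-- decomposition, same cost). Equality is claimed on nonnegative masks (Pre_); on negative masks
-- A's while-loop never terminates.

-- ===== PORT A =====
-- A's while-loop; the nonnegative masks admitted by Pre_ are carried as Nat.
def compressLoopA (union a b out_bit ca cb : Nat) : Nat × Nat :=
  if _h : union = 0 then (ca, cb)
  else if union % 2 = 1 then
    compressLoopA (union / 2) (a / 2) (b / 2) (out_bit + 1)
      (if a % 2 = 1 then ca ||| (1 <<< out_bit) else ca)
      (if b % 2 = 1 then cb ||| (1 <<< out_bit) else cb)
  else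
    compressLoopA (union / 2) (a / 2) (b / 2) out_bit ca cb
termination_by union
decreasing_by all_goals omega

def compress_cards (a : Int) (b : Int) : Int × Int :=
  -- totality guard: A's while-loop never terminates when a or b is negative (excluded by Pre_)
  if a < 0 ∨ b < 0 then (0, 0)
  else
    let r := compressLoopA (a.toNat ||| b.toNat) a.toNat b.toNat 0 0 0
    ((r.1 : Int), (r.2 : Int))

-- ===== PORT B =====
-- Source B step for step; masks as Nat (exact on the nonnegative inputs of Pre_);
-- bit_length of a nonnegative int is Nat.size.
def compress_cards_alt (a : Int) (b : Int) : Int × Int :=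
  let an := a.toNat
  let bn := b.toNat
  let union := an ||| bn
  let positions := (List.range (Nat.size union)).filter (fun i => (union >>> i) &&& 1 = 1)
  let comp_a := (((PySem.List.enumerate positions).filter
      (fun jp => (an >>> jp.2) &&& 1 = 1)).map (fun jp => (1 : Nat) <<< jp.1.toNat)).sum
  let comp_b := (((PySem.List.enumerate positions).filter
      (fun jp => (bn >>> jp.2) &&& 1 = 1)).map (fun jp => (1 : Nat) <<< jp.1.toNat)).sum
  ((comp_a : Int), (comp_b : Int))

-- ===== PRECONDITION & SPEC =====
-- Pre_ excludes negative masks: there A's `while union:` loops forever (A never returns).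
def Pre_compress_cards (a : Int) (b : Int) : Prop := 0 ≤ a ∧ 0 ≤ b
instance (a : Int) (b : Int) : Decidable (Pre_compress_cards a b) := by
  unfold Pre_compress_cards; infer_instance

def pvWitness_compress_cards : Int × Int := (21, 13)

def Spec_compress_cards (a : Int) (b : Int) (out : Int × Int) : Prop := out = compress_cards_alt a b
instance (a : Int) (b : Int) (out : Int × Int) : Decidable (Spec_compress_cards a b out) := by
  unfold Spec_compress_cards; infer_instance

-- ===== CLAIM (what is proved, stated in full; the proofs are below) =====
def Claim_equal_compress_cards : Prop := ∀ (a : Int) (b : Int), Dom_compress_cards a b →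
  Pre_compress_cards a b → Spec_compress_cards a b (compress_cards a b)

-- ===== LEMMAS AND PROOFS =====

-- the common compressed value: bits of x collected at the set-bit positions of u
def specC (u x : Nat) : Nat :=
  if _h : u = 0 then 0
  else if u % 2 = 1 then x % 2 + 2 * specC (u / 2) (x / 2)
  else specC (u / 2) (x / 2)
termination_by u
decreasing_by all_goals omega

theorem specC_zero (x : Nat) : specC 0 x = 0 := by rw [specC]; simp

theorem specC_odd (u x : Nat) (h0 : u ≠ 0) (h1 : u % 2 = 1) :
    specC u x = x % 2 + 2 * specC (u / 2) (x / 2) := by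
  rw [specC, dif_neg h0, if_pos h1]

theorem specC_even (u x : Nat) (h0 : u ≠ 0) (h1 : u % 2 ≠ 1) :
    specC u x = specC (u / 2) (x / 2) := by
  rw [specC, dif_neg h0, if_neg h1]

theorem lor_two_pow_add (b : Nat) : ∀ a : Nat, a < 2 ^ b → a ||| 2 ^ b = a + 2 ^ b := by
  induction b with
  | zero => intro a h; interval_cases a; decide
  | succ b ih =>
    intro a h
    have hdiv : (a ||| 2 ^ (b + 1)) / 2 = a / 2 ||| 2 ^ b := by
      rw [Nat.or_div_two]; congr 1; rw [pow_succ]; omega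
    have hpe : 2 ^ (b + 1) % 2 = 0 := by rw [pow_succ]; omega
    have hmod : (a ||| 2 ^ (b + 1)) % 2 = a % 2 := by
      have ht := Nat.testBit_lor a (2 ^ (b + 1)) 0
      simp only [Nat.testBit_zero, hpe] at ht
      rcases Nat.mod_two_eq_zero_or_one (a ||| 2 ^ (b + 1)) with h1 | h1 <;>
        rcases Nat.mod_two_eq_zero_or_one a with h2 | h2 <;> simp [h1, h2] at ht ⊢
    have h2 : a / 2 < 2 ^ b := by rw [pow_succ] at h; omega
    have hih := ih (a / 2) h2
    have hx := Nat.div_add_mod (a ||| 2 ^ (b + 1)) 2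
    rw [hdiv, hmod, hih] at hx
    rw [pow_succ] at *
    omega

theorem compressLoopA_eq : ∀ (u a b o ca cb : Nat), ca < 2 ^ o → cb < 2 ^ o →
    compressLoopA u a b o ca cb = (ca + 2 ^ o * specC u a, cb + 2 ^ o * specC u b) := by
  intro u
  induction u using Nat.strong_induction_on with
  | _ u ih =>
    intro a b o ca cb hca hcb
    by_cases h0 : u = 0
    · subst h0
      rw [compressLoopA]
      simp [specC_zero]
    · have hlt : u / 2 < u := by omega
      by_cases hodd : u % 2 = 1
      · rw [compressLoopA, dif_neg h0, if_pos hodd,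
          ih (u / 2) hlt (a / 2) (b / 2) (o + 1) _ _
            (by split <;> [rw [Nat.one_shiftLeft, lor_two_pow_add o ca hca]; skip] <;>
              rw [pow_succ] <;> omega)
            (by split <;> [rw [Nat.one_shiftLeft, lor_two_pow_add o cb hcb]; skip] <;>
              rw [pow_succ] <;> omega),
          specC_odd u a h0 hodd, specC_odd u b h0 hodd, Prod.mk.injEq]
        constructor
        · rcases Nat.mod_two_eq_zero_or_one a with ha | ha
          · rw [ha, if_neg (by norm_num), pow_succ]; ring
          · rw [ha, if_pos rfl, Nat.one_shiftLeft, lor_two_pow_add o ca hca, pow_succ]; ring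
        · rcases Nat.mod_two_eq_zero_or_one b with hb | hb
          · rw [hb, if_neg (by norm_num), pow_succ]; ring
          · rw [hb, if_pos rfl, Nat.one_shiftLeft, lor_two_pow_add o cb hcb, pow_succ]; ring
      · rw [compressLoopA, dif_neg h0, if_neg hodd,
          ih (u / 2) hlt (a / 2) (b / 2) o ca cb hca hcb,
          specC_even u a h0 hodd, specC_even u b h0 hodd]

theorem shiftRight_succ_div (x p : Nat) : x >>> (p + 1) = (x / 2) >>> p := by
  rw [Nat.shiftRight_eq_div_pow, Nat.shiftRight_eq_div_pow, Nat.div_div_eq_div_mul,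
    pow_succ, Nat.mul_comm (2 ^ p) 2]

-- Tsum x ps: value of B's enumerate-filter-sum over the position list ps (index weight 2^j)
def Tsum (x : Nat) : List Nat → Nat
  | [] => 0
  | p :: ps => (if (x >>> p) &&& 1 = 1 then 1 else 0) + 2 * Tsum x ps

theorem enum_sum (x : Nat) : ∀ (ps : List Nat) (s : Int), 0 ≤ s →
    (((PySem.List.enumerate ps s).filter (fun jp => (x >>> jp.2) &&& 1 = 1)).map
      (fun jp => (1 : Nat) <<< jp.1.toNat)).sum = 2 ^ s.toNat * Tsum x ps := by
  intro ps
  induction ps with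
  | nil => intro s hs; simp [PySem.List.enumerate_nil, Tsum]
  | cons p ps ih =>
    intro s hs
    rw [PySem.List.enumerate_cons]
    have hsucc : (s + 1).toNat = s.toNat + 1 := by omega
    have htail := ih (s + 1) (by omega)
    rw [hsucc] at htail
    simp only [List.filter_cons, Tsum]
    by_cases hp : (x >>> p) &&& 1 = 1
    · simp only [hp, decide_true, if_true, List.map_cons, List.sum_cons]
      rw [htail, Nat.one_shiftLeft, pow_succ]
      ring_nf
    · simp only [hp, decide_false, Bool.false_eq_true, if_false]
      rw [htail, pow_succ]
      ring

theorem Tsum_map_succ (x : Nat) : ∀ ps : List Nat,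
    Tsum x (ps.map (· + 1)) = Tsum (x / 2) ps := by
  intro ps
  induction ps with
  | nil => rfl
  | cons p ps ih => simp only [List.map_cons, Tsum, ih, shiftRight_succ_div x p]

-- the set-bit positions of u, as B's list comprehension produces them
def posL (u : Nat) : List Nat :=
  if _h : u = 0 then []
  else if u % 2 = 1 then 0 :: (posL (u / 2)).map (· + 1)
  else (posL (u / 2)).map (· + 1)
termination_by u
decreasing_by all_goals omega

theorem posL_zero : posL 0 = [] := by rw [posL]; simp

theorem posL_even (u : Nat) (h : u % 2 = 0) : posL u = (posL (u / 2)).map (· + 1) := by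
  by_cases h0 : u = 0
  · subst h0; simp [posL_zero]
  · rw [posL, dif_neg h0, if_neg (by omega)]

theorem range_filter_eq_posL : ∀ (n u : Nat), u < 2 ^ n →
    (List.range n).filter (fun i => (u >>> i) &&& 1 = 1) = posL u := by
  intro n
  induction n with
  | zero =>
    intro u h
    have : u = 0 := by omega
    subst this; simp [posL_zero]
  | succ n ih =>
    intro u h
    rw [List.range_succ_eq_map]
    have hd2 : u / 2 < 2 ^ n := by rw [pow_succ] at h; omega
    have htail : (List.filter (fun i => decide ((u >>> i) &&& 1 = 1))
        ((List.range n).map Nat.succ)) = (posL (u / 2)).map (· + 1) := by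
      rw [List.filter_map]
      have hfun : ((fun i => decide ((u >>> i) &&& 1 = 1)) ∘ Nat.succ)
          = (fun i => decide (((u / 2) >>> i) &&& 1 = 1)) := by
        funext i
        simp only [Function.comp_apply, Nat.succ_eq_add_one]
        exact decide_eq_decide.mpr (by rw [shiftRight_succ_div u i])
      rw [hfun, ih (u / 2) hd2]
    have hhead : (u >>> 0) &&& 1 = u % 2 := by
      rw [Nat.shiftRight_zero, Nat.and_one_is_mod]
    simp only [List.filter_cons]
    by_cases hodd : u % 2 = 1
    · rw [posL, dif_neg (by omega : u ≠ 0), if_pos hodd]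
      simp only [hhead, hodd, decide_true, if_true]
      rw [htail]
    · rw [posL_even u (by omega)]
      simp only [hhead]
      rw [if_neg (by simpa using hodd)]
      rw [htail]

theorem Tsum_posL : ∀ u x : Nat, Tsum x (posL u) = specC u x := by
  intro u
  induction u using Nat.strong_induction_on with
  | _ u ih =>
    intro x
    by_cases h0 : u = 0
    · subst h0; simp [posL_zero, specC_zero, Tsum]
    · have hlt : u / 2 < u := by omega
      by_cases hodd : u % 2 = 1
      · rw [posL, dif_neg h0, if_pos hodd, specC_odd u x h0 hodd]
        simp only [Tsum, Tsum_map_succ, ih (u / 2) hlt (x / 2)]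
        congr 1
        rw [Nat.shiftRight_zero, Nat.and_one_is_mod]
        rcases Nat.mod_two_eq_zero_or_one x with h | h <;> simp [h]
      · rw [posL_even u (by omega), specC_even u x h0 hodd,
          Tsum_map_succ, ih (u / 2) hlt (x / 2)]

-- ===== VERDICT (by name: the statement is the Claim_ definition above) =====
theorem compress_cards_spec : Claim_equal_compress_cards := by
  intro a b _ hpre
  obtain ⟨ha, hb⟩ := hpre
  unfold Spec_compress_cards compress_cards compress_cards_alt
  rw [if_neg (by omega)]
  dsimp only
  rw [compressLoopA_eq (a.toNat ||| b.toNat) a.toNat b.toNat 0 0 0 (by norm_num) (by norm_num)]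
  rw [range_filter_eq_posL (Nat.size (a.toNat ||| b.toNat)) (a.toNat ||| b.toNat)
    (Nat.lt_size_self _)]
  rw [enum_sum a.toNat (posL (a.toNat ||| b.toNat)) 0 (by norm_num),
    enum_sum b.toNat (posL (a.toNat ||| b.toNat)) 0 (by norm_num)]
  rw [Tsum_posL, Tsum_posL]
  norm_num
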